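-- pv_equiv track=rewrite | github.com/lalapopa/fall_guy_bot | save_csv_log_in_runs.py | remove_none_from_img_array
-- ===== SOURCE A (Python) =====
-- def remove_none_from_img_array(img_array):
--     none_positions = []
--     counter = -1
--     raw_img_array = [img for img in img_array]
--
--     for img in img_array:
--         counter += 1
--         if img is None:
--             none_positions.append(counter)
--
--     none_positions.sort(reverse=True)
--
--     for position in none_positions:
--         raw_img_array.pop(position)
--
--     return raw_img_array, none_positions
-- ===== SOURCE B (Python) =====
-- def remove_none_from_img_array(img_array):
--     vals = []
--     none_idx = []
--     for i, img in enumerate(img_array):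
--         if img is None:
--             none_idx.append(i)
--         else:
--             vals.append(img)
--     none_idx.reverse()
--     return vals, none_idx
-- ===== Notes on version B (the rewrite author's own statement) =====
-- stated objective: faster
-- what changed: Replaces the two-pass collect-then-pop scheme (each pop shifts the tail) with a single enumerate pass that partitions values and None indices, reversing the index list once.
import Mathlib
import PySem

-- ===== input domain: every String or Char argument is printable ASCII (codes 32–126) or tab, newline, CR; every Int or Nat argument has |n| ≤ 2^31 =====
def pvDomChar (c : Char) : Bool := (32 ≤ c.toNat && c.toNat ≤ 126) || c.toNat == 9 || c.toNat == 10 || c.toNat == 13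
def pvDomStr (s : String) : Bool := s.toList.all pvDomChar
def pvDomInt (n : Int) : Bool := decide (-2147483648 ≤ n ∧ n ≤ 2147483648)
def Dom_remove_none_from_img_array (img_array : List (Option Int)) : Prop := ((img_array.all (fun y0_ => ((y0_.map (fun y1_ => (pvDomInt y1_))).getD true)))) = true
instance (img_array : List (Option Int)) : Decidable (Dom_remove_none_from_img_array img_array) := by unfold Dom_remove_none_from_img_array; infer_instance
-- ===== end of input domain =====

-- B replaces A's collect-positions-then-pop-each scheme (each pop shifts the tail, O(n*k))
-- with one enumerate pass partitioning values and None indices, reversing the indices once (O(n)).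

-- ===== PORT A =====
def remove_none_from_img_array (img_array : List (Option Int)) : List Int × List Int :=
  let raw_img_array := img_array.map (fun img => img)
  let st := img_array.foldl
    (fun (s : Int × List Int) img =>
      let counter := s.1 + 1
      if img = none then (counter, s.2 ++ [counter]) else (counter, s.2))
    (-1, [])
  let none_positions := PySem.List.sorted st.2 (fun x => x) true
  let raw := none_positions.foldl
    (fun raw position =>
      match PySem.List.pop? raw position with
      | some r => r.2
      | none => raw)   -- pop on a computed valid index: never fails for this program
    raw_img_array
  (raw.filterMap id, none_positions)   -- after the pops every element is non-None (result list of ints)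

-- ===== PORT B =====
def remove_none_from_img_array_alt (img_array : List (Option Int)) : List Int × List Int :=
  let s := (PySem.List.enumerate img_array 0).foldl
    (fun (s : List Int × List Int) p =>
      match p.2 with
      | none => (s.1, s.2 ++ [p.1])
      | some v => (s.1 ++ [v], s.2))
    ([], [])
  (s.1, s.2.reverse)

-- ===== PRECONDITION & SPEC =====
def Spec_remove_none_from_img_array (img_array : List (Option Int)) (out : List Int × List Int) : Prop := out = remove_none_from_img_array_alt img_array
instance (img_array : List (Option Int)) (out : List Int × List Int) : Decidable (Spec_remove_none_from_img_array img_array out) := by unfold Spec_remove_none_from_img_array; infer_instance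

-- ===== CLAIM (what is proved, stated in full; the proofs are below) =====
def Claim_equal_remove_none_from_img_array : Prop := ∀ (img_array : List (Option Int)), Dom_remove_none_from_img_array img_array → Spec_remove_none_from_img_array img_array (remove_none_from_img_array img_array)

-- ===== LEMMAS AND PROOFS =====

/-- Ascending list of the (0-based) positions of `none` in `xs`, counting from `c`. -/
def npos : List (Option Int) → Int → List Int
  | [], _ => []
  | x :: t, c => (if x = none then [c] else []) ++ npos t (c + 1)

theorem npos_mem {xs : List (Option Int)} {c p : Int} (h : p ∈ npos xs c) :
    c ≤ p ∧ p < c + xs.length := by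
  induction xs generalizing c with
  | nil => simp [npos] at h
  | cons x t ih =>
    simp only [npos, List.mem_append] at h
    rcases h with h | h
    · split at h <;> simp_all
    · have := ih h
      simp only [List.length_cons]
      push_cast
      omega

theorem npos_pairwise (xs : List (Option Int)) (c : Int) :
    (npos xs c).Pairwise (· < ·) := by
  induction xs generalizing c with
  | nil => simp [npos]
  | cons x t ih =>
    simp only [npos]
    refine List.pairwise_append.mpr ⟨?_, ih (c + 1), ?_⟩
    · split <;> simp
    · intro a ha b hb
      have hb' := npos_mem hb
      split at ha <;> simp_all

theorem npos_shift (xs : List (Option Int)) (c : Int) :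
    npos xs (c + 1) = (npos xs c).map (· + 1) := by
  induction xs generalizing c with
  | nil => simp [npos]
  | cons x t ih => simp [npos, ih]; split <;> simp

/-- A's first loop: counter + append of `none` positions. -/
theorem foldA (xs : List (Option Int)) (c : Int) (acc : List Int) :
    xs.foldl (fun (s : Int × List Int) img =>
        let counter := s.1 + 1
        if img = none then (counter, s.2 ++ [counter]) else (counter, s.2))
      (c, acc)
    = (c + xs.length, acc ++ npos xs (c + 1)) := by
  induction xs generalizing c acc with
  | nil => simp [npos]
  | cons x t ih =>
    simp only [List.foldl_cons, npos]
    split <;> simp [ih] <;> omega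
  
/-- B's single pass over `enumerate`. -/
theorem foldB (xs : List (Option Int)) (s : Int) (v a : List Int) :
    (PySem.List.enumerate xs s).foldl
      (fun (s : List Int × List Int) p =>
        match p.2 with
        | none => (s.1, s.2 ++ [p.1])
        | some w => (s.1 ++ [w], s.2))
      (v, a)
    = (v ++ xs.filterMap id, a ++ npos xs s) := by
  induction xs generalizing s v a with
  | nil => simp [PySem.List.enumerate_nil, npos]
  | cons x t ih =>
    rw [PySem.List.enumerate_cons]
    cases x <;> simp [npos, ih]

/-- One pop at a positive in-range index leaves the head alone. -/
theorem popStep_cons (x : Option Int) (t : List (Option Int)) (d : Int)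
    (h0 : 0 ≤ d) (h1 : d < t.length) :
    (match PySem.List.pop? (x :: t) (d + 1) with
      | some r => r.2
      | none => x :: t)
    = x :: (match PySem.List.pop? t d with
      | some r => r.2
      | none => t) := by
  have hd : d = (d.toNat : Int) := by omega
  have h1' : d.toNat < t.length := by omega
  have h2 : d + 1 = ((d.toNat + 1 : Nat) : Int) := by omega
  rw [h2, PySem.List.pop?_natCast (x :: t) (d.toNat + 1) (by simp; omega)]
  conv_rhs => rw [hd]
  rw [PySem.List.pop?_natCast t d.toNat h1']
  simp

/-- Popping shifted (+1) positions on `x :: t` never touches `x`. -/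
theorem popFold_shift (ds : List Int) (x : Option Int) (t : List (Option Int))
    (hp : ds.Pairwise (· > ·)) (hb : ∀ d ∈ ds, 0 ≤ d ∧ d < t.length) :
    (ds.map (· + 1)).foldl
      (fun raw position =>
        match PySem.List.pop? raw position with
        | some r => r.2
        | none => raw) (x :: t)
    = x :: ds.foldl
      (fun raw position =>
        match PySem.List.pop? raw position with
        | some r => r.2
        | none => raw) t := by
  induction ds generalizing t with
  | nil => simp
  | cons d ds ih =>
    have hd := hb d (by simp)
    simp only [List.map_cons, List.foldl_cons]
    rw [popStep_cons x t d hd.1 hd.2]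
    have hd' : d = (d.toNat : Int) := by omega
    have h1' : d.toNat < t.length := by omega
    rw [hd', PySem.List.pop?_natCast t d.toNat h1']
    simp only
    refine ih _ hp.of_cons ?_
    intro e he
    have h2 := hb e (by simp [he])
    have h3 : e < d := List.rel_of_pairwise_cons hp he
    have h4 : (t.eraseIdx d.toNat).length = t.length - 1 := by
      rw [List.length_eraseIdx_of_lt h1']
    constructor
    · exact h2.1
    · rw [h4]; omega

/-- A's pop loop over the descending `none` positions = filtering out the `none`s. -/
theorem popFold (xs : List (Option Int)) :
    ((npos xs 0).reverse).foldl
      (fun raw position =>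
        match PySem.List.pop? raw position with
        | some r => r.2
        | none => raw) xs
    = xs.filter (fun o => o.isSome) := by
  induction xs with
  | nil => simp [npos]
  | cons x t ih =>
    have hsh : npos t 1 = (npos t 0).map (· + 1) := by
      have := npos_shift t 0; simpa using this
    have hrev : (npos (x :: t) 0).reverse
        = ((npos t 0).reverse.map (· + 1)) ++ (if x = none then [0] else []) := by
      simp [npos, hsh]
      split <;> simp
    rw [hrev, List.foldl_append]
    have hp : (npos t 0).reverse.Pairwise (· > ·) := by
      rw [List.pairwise_reverse]
      exact (npos_pairwise t 0).imp (fun h => h)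
    have hb : ∀ d ∈ (npos t 0).reverse, 0 ≤ d ∧ d < t.length := by
      intro d hd
      rw [List.mem_reverse] at hd
      have := npos_mem hd
      omega
    rw [popFold_shift _ x t hp hb, ih]
    cases x with
    | none => simp [PySem.List.pop?_zero_cons]
    | some v => simp

/-- The descending sort of the ascending position list is its reverse. -/
theorem sorted_npos (xs : List (Option Int)) :
    PySem.List.sorted (npos xs 0) (fun x => x) true = (npos xs 0).reverse := by
  refine PySem.List.sorted_rev_eq_of_perm_of_pairwise_gt _ _ _ (List.reverse_perm _) ?_
  rw [List.pairwise_reverse]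
  exact (npos_pairwise xs 0).imp (fun h => h)

theorem filterMap_filter_isSome (xs : List (Option Int)) :
    (xs.filter (fun o => o.isSome)).filterMap id = xs.filterMap id := by
  induction xs with
  | nil => rfl
  | cons x t ih => cases x <;> simpa using ih

-- ===== VERDICT (by name: the statement is the Claim_ definition above) =====
theorem remove_none_from_img_array_spec : Claim_equal_remove_none_from_img_array := by
  intro xs _
  unfold Spec_remove_none_from_img_array remove_none_from_img_array remove_none_from_img_array_alt
  simp only [List.map_id', foldA, foldB, List.nil_append]
  norm_num
  rw [sorted_npos, popFold]
  exact ⟨by simpa using filterMap_filter_isSome xs, rfl⟩
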